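-- pv_equiv track=rewrite | github.com/Panda4817/advent-of-code-2022 | year2016/21/21.py | part1
-- ===== SOURCE A (Python) =====
-- import copy
--
-- def swap_position(p1, p2, s):
--     i = int(p1)
--     j = int(p2)
--     a = s[i]
--     b = s[j]
--     s[i] = b
--     s[j] = a
--     return s
--
-- def swap_letter(l1, l2, s):
--     i = s.index(l1)
--     j = s.index(l2)
--     s[j] = l1
--     s[i] = l2
--     return s
--
-- def reverse_position(p1, p2, s):
--     i = int(p1)
--     j = int(p2)
--     r = copy.deepcopy(s[i:j + 1])
--     r.reverse()
--     return s[0:i] + r + s[j + 1:]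
--
-- def move_positions(i1, i2, s):
--     l = s.pop(int(i1))
--     s.insert(int(i2), l)
--     return s
--
-- def rotate_right(num, s):
--     n = int(num)
--     if n % len(s) == 0:
--         return s
--     for i in range(n):
--         l = s.pop()
--         s.insert(0, l)
--     return s
--
-- def rotate_left(num, s):
--     n = int(num)
--     if n % len(s) == 0:
--         return s
--     for i in range(n):
--         l = s.pop(0)
--         s.append(l)
--     return s
--
-- def rotate_position(l, s):
--     index = s.index(l)
--     rot = index + 1
--     if index >= 4:
--         rot += 1
--     return rotate_right(rot, s)
--
-- def part1(data):
--   instructions = [l.split() for l in data.split("\n")]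
--   s = list("abcdefgh")
--   for i in instructions:
--     cp = copy.deepcopy(s)
--     if i[0] == "swap":
--         if i[1] == "position":
--             s = swap_position(i[2], i[5], cp)
--         elif i[1] == "letter":
--             s = swap_letter(i[2], i[5], cp)
--     elif i[0] == "rotate":
--         if i[1] == "left":
--             s = rotate_left(i[2], cp)
--         elif i[1] == "right":
--             s = rotate_right(i[2], cp)
--         elif i[1] == "based":
--             s = rotate_position(i[6], cp)
--     elif i[0] == "reverse":
--         s = reverse_position(i[2], i[4], cp)
--     elif i[0] == "move":
--         s = move_positions(i[2], i[5], cp)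
--
--   return "".join(s)
-- ===== SOURCE B (Python) =====
-- def part1(data):
--     s = "abcdefgh"
--     for line in data.split("\n"):
--         t = line.split()
--         op = t[0]
--         if op == "swap":
--             if t[1] == "position":
--                 a, b = s[int(t[2])], s[int(t[5])]
--             elif t[1] == "letter":
--                 a, b = t[2], t[5]
--             else:
--                 continue
--             s = s.translate(str.maketrans(a + b, b + a))
--         elif op == "rotate":
--             kind = t[1]
--             if kind == "left":
--                 e = int(t[2]) % len(s)
--             elif kind == "right":
--                 e = -int(t[2]) % len(s)
--             elif kind == "based":
--                 i = s.index(t[6])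
--                 e = -(i + (2 if i >= 4 else 1)) % len(s)
--             else:
--                 continue
--             s = s[e:] + s[:e]
--         elif op == "reverse":
--             i, j = int(t[2]), int(t[4])
--             s = s[:i] + s[i:j + 1][::-1] + s[j + 1:]
--         elif op == "move":
--             i, j = int(t[2]), int(t[5])
--             i %= len(s)
--             c = s[i]
--             r = s[:i] + s[i + 1:]
--             s = r[:j] + c + r[j:]
--     return s
-- ===== Notes on version B (the rewrite author's own statement) =====
-- stated objective: alternative
-- what changed: B scrambles an immutable string with slice/concatenation and character-translation maps instead of A's deepcopied mutable list: both swap forms become one two-letter translation map, the element-by-element rotate loops become a single closed-form rotation by the amount mod 8, and move/reverse become slice arithmetic.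
-- outside the precondition, e.g. on part1('rotate right -3 steps'): A returns 'abcdefgh', B returns 'defghabc'
import Mathlib
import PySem

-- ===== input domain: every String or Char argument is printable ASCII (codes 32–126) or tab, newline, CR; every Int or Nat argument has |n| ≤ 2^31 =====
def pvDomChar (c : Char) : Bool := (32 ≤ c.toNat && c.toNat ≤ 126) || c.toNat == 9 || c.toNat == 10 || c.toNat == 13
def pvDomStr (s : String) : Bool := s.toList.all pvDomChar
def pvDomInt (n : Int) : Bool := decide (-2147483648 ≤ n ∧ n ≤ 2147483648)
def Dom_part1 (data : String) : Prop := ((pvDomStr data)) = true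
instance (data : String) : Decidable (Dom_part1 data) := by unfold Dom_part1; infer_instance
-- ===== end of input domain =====

-- B re-implements the scrambler on an immutable string: every instruction becomes a
-- slice/concatenation or a character-translation map, the rotate loops become closed-form
-- rotations by an amount mod 8 (objective: alternative; equal cost on these tiny strings).

-- ===== PORT A =====

-- s[i] = v  (IndexError → none)
def pvSet? {α : Type} (s : List α) (i : Int) (v : α) : Option (List α) :=
  (PySem.List.pyIdx? s.length i).map fun k => s.set k v

def pySwapPosition (p1 p2 : String) (s : List String) : Option (List String) :=
  (PySem.Int.ofStr? p1).bind fun i =>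
  (PySem.Int.ofStr? p2).bind fun j =>
  (PySem.List.pyGet? s i).bind fun a =>
  (PySem.List.pyGet? s j).bind fun b =>
  (pvSet? s i b).bind fun s1 =>
  pvSet? s1 j a

def pySwapLetter (l1 l2 : String) (s : List String) : Option (List String) :=
  (PySem.List.index? s l1).bind fun i =>
  (PySem.List.index? s l2).bind fun j =>
  some ((s.set j l1).set i l2)

def pyReversePosition (p1 p2 : String) (s : List String) : Option (List String) :=
  (PySem.Int.ofStr? p1).bind fun i =>
  (PySem.Int.ofStr? p2).bind fun j =>
  some (PySem.List.slice s (some 0) (some i) ++ (PySem.List.slice s (some i) (some (j + 1))).reverse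
        ++ PySem.List.slice s (some (j + 1)) none)

def pyMovePositions (i1 i2 : String) (s : List String) : Option (List String) :=
  (PySem.Int.ofStr? i1).bind fun i =>
  (PySem.List.pop? s i).bind fun r =>
  (PySem.Int.ofStr? i2).map fun j =>
  PySem.List.insert r.2 j r.1

-- rotate_right with n already an int (rotate_position calls it with the computed rot;
-- int(num) on an int is the identity)
def pyRotRightCore (n : Int) (s : List String) : Option (List String) :=
  (PySem.Int.mod? n (s.length : Int)).bind fun m =>
  if m = 0 then some s
  else
    (PySem.List.pyRange 0 n 1).foldl
      (fun acc _ => acc.bind fun t =>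
        (PySem.List.pop? t).map fun r => PySem.List.insert r.2 0 r.1)
      (some s)

def pyRotLeftCore (n : Int) (s : List String) : Option (List String) :=
  (PySem.Int.mod? n (s.length : Int)).bind fun m =>
  if m = 0 then some s
  else
    (PySem.List.pyRange 0 n 1).foldl
      (fun acc _ => acc.bind fun t =>
        (PySem.List.pop? t 0).map fun r => r.2 ++ [r.1])
      (some s)

def pyRotateRight (num : String) (s : List String) : Option (List String) :=
  (PySem.Int.ofStr? num).bind fun n => pyRotRightCore n s

def pyRotateLeft (num : String) (s : List String) : Option (List String) :=
  (PySem.Int.ofStr? num).bind fun n => pyRotLeftCore n s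

def pyRotatePosition (l : String) (s : List String) : Option (List String) :=
  (PySem.List.index? s l).bind fun idx =>
  let rot : Int := (idx : Int) + 1
  let rot := if (idx : Int) ≥ 4 then rot + 1 else rot
  pyRotRightCore rot s

def pvStepA (i : List String) (s : List String) : Option (List String) :=
  (PySem.List.pyGet? i 0).bind fun op =>
  if op = "swap" then
    (PySem.List.pyGet? i 1).bind fun w =>
    if w = "position" then
      (PySem.List.pyGet? i 2).bind fun a =>
      (PySem.List.pyGet? i 5).bind fun b =>
      pySwapPosition a b s
    else if w = "letter" then
      (PySem.List.pyGet? i 2).bind fun a =>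
      (PySem.List.pyGet? i 5).bind fun b =>
      pySwapLetter a b s
    else some s
  else if op = "rotate" then
    (PySem.List.pyGet? i 1).bind fun w =>
    if w = "left" then
      (PySem.List.pyGet? i 2).bind fun a => pyRotateLeft a s
    else if w = "right" then
      (PySem.List.pyGet? i 2).bind fun a => pyRotateRight a s
    else if w = "based" then
      (PySem.List.pyGet? i 6).bind fun a => pyRotatePosition a s
    else some s
  else if op = "reverse" then
    (PySem.List.pyGet? i 2).bind fun a =>
    (PySem.List.pyGet? i 4).bind fun b =>
    pyReversePosition a b s
  else if op = "move" then
    (PySem.List.pyGet? i 2).bind fun a =>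
    (PySem.List.pyGet? i 5).bind fun b =>
    pyMovePositions a b s
  else some s

def part1 (data : String) : String :=
  let instructions := ((PySem.Str.split? data "\n").getD []).map PySem.Str.split₀
  let s0 : List String := ["a", "b", "c", "d", "e", "f", "g", "h"]
  match instructions.foldl (fun acc i => acc.bind (pvStepA i)) (some s0) with
  | some s => PySem.Str.join "" s
  | none => ""

-- ===== PORT B =====

-- s.translate(str.maketrans(a + b, b + a)) for one-character a, b: map each char
def pvSwapB (a b : Char) (cs : List Char) : List Char :=
  cs.map fun c => if c = a then b else if c = b then a else c

-- s[e:] + s[:e]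
def pvRotB (e : Int) (cs : List Char) : List Char :=
  PySem.List.slice cs (some e) none ++ PySem.List.slice cs none (some e)

def pvStepB (t : List String) (cs : List Char) : Option (List Char) :=
  (PySem.List.pyGet? t 0).bind fun op =>
  if op = "swap" then
    (PySem.List.pyGet? t 1).bind fun w =>
    if w = "position" then
      (PySem.List.pyGet? t 2).bind fun x =>
      (PySem.Int.ofStr? x).bind fun i =>
      (PySem.List.pyGet? cs i).bind fun a =>
      (PySem.List.pyGet? t 5).bind fun y =>
      (PySem.Int.ofStr? y).bind fun j =>
      (PySem.List.pyGet? cs j).map fun b =>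
      pvSwapB a b cs
    else if w = "letter" then
      (PySem.List.pyGet? t 2).bind fun x =>
      (PySem.List.pyGet? t 5).bind fun y =>
      -- str.maketrans(x+y, y+x): a char map built left to right (later pairs overwrite),
      -- applied pointwise by translate; never raises since both sides have equal length
      some (cs.map (fun c =>
        ((((x.toList ++ y.toList).zip (y.toList ++ x.toList)).reverse.find?
            (fun p => p.1 = c)).map (·.2)).getD c))
    else some cs
  else if op = "rotate" then
    (PySem.List.pyGet? t 1).bind fun kind =>
    if kind = "left" then
      (PySem.List.pyGet? t 2).bind fun x =>
      (PySem.Int.ofStr? x).bind fun n =>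
      (PySem.Int.mod? n (cs.length : Int)).map fun e => pvRotB e cs
    else if kind = "right" then
      (PySem.List.pyGet? t 2).bind fun x =>
      (PySem.Int.ofStr? x).bind fun n =>
      (PySem.Int.mod? (-n) (cs.length : Int)).map fun e => pvRotB e cs
    else if kind = "based" then
      (PySem.List.pyGet? t 6).bind fun x =>
      -- i = s.index(t[6]) on a string: first occurrence, ValueError if absent
      (if PySem.Chars.find cs x.toList = -1 then none
       else some (PySem.Chars.find cs x.toList).toNat).bind fun i =>
      (PySem.Int.mod? (-((i : Int) + (if 4 ≤ i then 2 else 1))) (cs.length : Int)).map fun e =>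
      pvRotB e cs
    else some cs
  else if op = "reverse" then
    (PySem.List.pyGet? t 2).bind fun x =>
    (PySem.Int.ofStr? x).bind fun i =>
    (PySem.List.pyGet? t 4).bind fun y =>
    (PySem.Int.ofStr? y).bind fun j =>
    -- s[:i] + s[i:j+1][::-1] + s[j+1:]   ([::-1] is reversal: PySem.List.slice?_none_none_neg_one)
    some (PySem.List.slice cs none (some i) ++ (PySem.List.slice cs (some i) (some (j + 1))).reverse
          ++ PySem.List.slice cs (some (j + 1)) none)
  else if op = "move" then
    (PySem.List.pyGet? t 2).bind fun x =>
    (PySem.Int.ofStr? x).bind fun i0 =>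
    (PySem.List.pyGet? t 5).bind fun y =>
    (PySem.Int.ofStr? y).bind fun j =>
    (PySem.Int.mod? i0 (cs.length : Int)).bind fun i =>   -- i %= len(s)
    (PySem.List.pyGet? cs i).map fun c =>                  -- c = s[i]
    let r := PySem.List.slice cs none (some i) ++ PySem.List.slice cs (some (i + 1)) none
    PySem.List.slice r none (some j) ++ c :: PySem.List.slice r (some j) none
  else some cs

def part1_alt (data : String) : String :=
  match ((PySem.Str.split? data "\n").getD []).foldl
      (fun acc line => acc.bind (pvStepB (PySem.Str.split₀ line))) (some ("abcdefgh".toList)) with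
  | some cs => String.ofList cs
  | none => ""

-- ===== PRECONDITION & SPEC =====

def pvIsLetter (x : String) : Bool := (["a", "b", "c", "d", "e", "f", "g", "h"] : List String).contains x

-- One instruction line is well formed: the token shapes A dispatches on, int tokens where A
-- calls int(), positions within the 8-character string, non-inverted reverse ranges,
-- letters among a..h, and nonnegative rotate counts.
def pvOkLine (t : List String) : Bool :=
  match t[0]? with
  | none => false
  | some op =>
    if op = "swap" then
      match t[1]? with
      | none => false
      | some w =>
        if w = "position" then
          match t[2]?, t[5]? with
          | some a, some b =>
            match PySem.Int.ofStr? a, PySem.Int.ofStr? b with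
            | some i, some j => decide (-8 ≤ i ∧ i ≤ 7 ∧ -8 ≤ j ∧ j ≤ 7)
            | _, _ => false
          | _, _ => false
        else if w = "letter" then
          match t[2]?, t[5]? with
          | some a, some b => pvIsLetter a && pvIsLetter b
          | _, _ => false
        else true
    else if op = "rotate" then
      match t[1]? with
      | none => false
      | some w =>
        if w = "left" ∨ w = "right" then
          match t[2]? with
          | some a =>
            match PySem.Int.ofStr? a with
            | some n => decide (0 ≤ n)
            | none => false
          | none => false
        else if w = "based" then
          match t[6]? with
          | some a => pvIsLetter a
          | none => false
        else true
    else if op = "reverse" then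
      match t[2]?, t[4]? with
      | some a, some b =>
        match PySem.Int.ofStr? a, PySem.Int.ofStr? b with
        | some i, some j => decide (0 ≤ i ∧ i ≤ j ∧ j ≤ 7)
        | _, _ => false
      | _, _ => false
    else if op = "move" then
      match t[2]?, t[5]? with
      | some a, some b =>
        match PySem.Int.ofStr? a, PySem.Int.ofStr? b with
        | some i, some _ => decide (-8 ≤ i ∧ i ≤ 7)
        | _, _ => false
      | _, _ => false
    else true

-- Pre_ excludes the inputs where A raises (malformed lines, out-of-range indices, letters not
-- in the string, rotate counts whose string is not an int) and, stated in the header cites: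
-- inverted reverse ranges (the degenerate slice leaves s no longer an 8-letter permutation,
-- so all later behaviour is accidental) and negative rotate counts (an unspecified corner:
-- A's silent no-op and B's inverse rotation are both defensible readings).
def Pre_part1 (data : String) : Prop :=
  (((PySem.Str.split? data "\n").getD []).all fun l => pvOkLine (PySem.Str.split₀ l)) = true

instance (data : String) : Decidable (Pre_part1 data) := by unfold Pre_part1; infer_instance

def pvWitness_part1 : String := "swap letter a with letter d"

def Spec_part1 (data : String) (out : String) : Prop := out = part1_alt data
instance (data : String) (out : String) : Decidable (Spec_part1 data out) := by unfold Spec_part1; infer_instance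

-- ===== CLAIM (what is proved, stated in full; the proofs are below) =====
def Claim_equal_part1 : Prop := ∀ (data : String), Dom_part1 data → Pre_part1 data → Spec_part1 data (part1 data)

-- ===== LEMMAS AND PROOFS =====

-- ---- proof-only helpers ----

def pvToS (c : Char) : String := String.ofList [c]
def pvBase : List Char := "abcdefgh".toList

lemma toList_pvToS (c : Char) : (pvToS c).toList = [c] := by simp [pvToS]

lemma pvToS_inj {c d : Char} (h : pvToS c = pvToS d) : c = d := by
  have := congrArg String.toList h
  simpa [toList_pvToS] using this

lemma pyGet?_nat {α : Type} (l : List α) (n : Nat) : PySem.List.pyGet? l (n : Int) = l[n]? := by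
  simp only [PySem.List.pyGet?, PySem.List.pyIdx?]
  split_ifs with h0 h
  · simp
  · exact (List.getElem?_eq_none (by exact_mod_cast not_lt.mp h)).symm
  · exfalso; omega
  · exfalso; omega

lemma pyGet?_zero {α : Type} (l : List α) : PySem.List.pyGet? l 0 = l[0]? := by
  simpa using pyGet?_nat l 0
lemma pyGet?_one {α : Type} (l : List α) : PySem.List.pyGet? l 1 = l[1]? := by
  simpa using pyGet?_nat l 1
lemma pyGet?_two {α : Type} (l : List α) : PySem.List.pyGet? l 2 = l[2]? := by
  simpa using pyGet?_nat l 2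
lemma pyGet?_four {α : Type} (l : List α) : PySem.List.pyGet? l 4 = l[4]? := by
  simpa using pyGet?_nat l 4
lemma pyGet?_five {α : Type} (l : List α) : PySem.List.pyGet? l 5 = l[5]? := by
  simpa using pyGet?_nat l 5
lemma pyGet?_six {α : Type} (l : List α) : PySem.List.pyGet? l 6 = l[6]? := by
  simpa using pyGet?_nat l 6

lemma pyGet?_map {α β : Type} (f : α → β) (l : List α) (i : Int) :
    PySem.List.pyGet? (l.map f) i = (PySem.List.pyGet? l i).map f := by
  simp only [PySem.List.pyGet?, List.length_map]
  cases PySem.List.pyIdx? l.length i <;> simp [List.getElem?_map]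

lemma index?_map_inj {α β : Type} [DecidableEq α] [DecidableEq β] (f : α → β)
    (hf : ∀ x y, f x = f y → x = y) (l : List α) (c : α) :
    PySem.List.index? (l.map f) (f c) = PySem.List.index? l c := by
  induction l with
  | nil => simp [PySem.List.index?]
  | cons x xs ih =>
    by_cases hx : x = c
    · subst hx; simp [PySem.List.index?, List.idxOf?_cons]
    · have hfx : ¬ f x = f c := fun h => hx (hf _ _ h)
      simp only [PySem.List.index?, List.map_cons, List.idxOf?_cons, beq_iff_eq, hx, hfx,
        if_false] at ih ⊢
      rw [ih]

lemma swap_sets (cs : List Char) (hnd : cs.Nodup) {i j : Nat} (hi : i < cs.length)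
    (hj : j < cs.length) :
    (cs.set i cs[j]).set j cs[i] = pvSwapB cs[i] cs[j] cs := by
  apply List.ext_getElem
  · simp [pvSwapB]
  · intro m hm hm'
    have hmlen : m < cs.length := by simpa [pvSwapB] using hm'
    simp only [List.getElem_set, pvSwapB, List.getElem_map]
    by_cases hmj : j = m
    · subst hmj
      by_cases hij : i = j
      · subst hij; simp
      · have h1 : ¬ cs[j] = cs[i] := by rw [hnd.getElem_inj_iff]; omega
        simp [h1]
    · by_cases hmi : i = m
      · subst hmi
        simp [hmj]
      · have h1 : ¬ cs[m] = cs[i] := by rw [hnd.getElem_inj_iff]; omega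
        have h2 : ¬ cs[m] = cs[j] := by rw [hnd.getElem_inj_iff]; omega
        simp [hmj, hmi, h1, h2]

lemma pvSwapB_comm (a b : Char) (cs : List Char) : pvSwapB a b cs = pvSwapB b a cs := by
  unfold pvSwapB
  apply List.map_congr_left
  intro c _
  by_cases h1 : c = a <;> by_cases h2 : c = b <;> simp [h1, h2] <;> simp_all

lemma translate_pair (c1 c2 : Char) (cs : List Char) :
    cs.map (fun c =>
      (((((pvToS c1).toList ++ (pvToS c2).toList).zip ((pvToS c2).toList ++ (pvToS c1).toList)).reverse.find?
          (fun p => p.1 = c)).map (·.2)).getD c) = pvSwapB c1 c2 cs := by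
  apply List.map_congr_left
  intro c _
  simp only [toList_pvToS]
  have hz : (([c1] ++ [c2]).zip ([c2] ++ [c1])).reverse = [(c2, c1), (c1, c2)] := rfl
  rw [hz]
  by_cases h1 : c = c1 <;> by_cases h2 : c = c2 <;>
    simp [List.find?, h1, h2] <;> simp_all [eq_comm]

lemma pvSwapB_perm {cs : List Char} {a b : Char} (hnd : cs.Nodup) (ha : a ∈ cs) (hb : b ∈ cs) :
    (pvSwapB a b cs).Perm cs := by
  obtain ⟨i, hi, rfl⟩ := List.getElem_of_mem ha
  obtain ⟨j, hj, rfl⟩ := List.getElem_of_mem hb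
  rw [← swap_sets cs hnd hi hj]
  exact List.set_set_perm hi hj

lemma fmod8 (a : Int) : Int.fmod a 8 = a % 8 := by
  simp [Int.fmod_eq_emod]

lemma foldl_const {α β : Type} (l : List β) (g : Option (List α) → Option (List α))
    (init : Option (List α)) :
    l.foldl (fun a _ => g a) init = g^[l.length] init := by
  induction l generalizing init with
  | nil => rfl
  | cons x xs ih => simp [List.foldl_cons, ih, Function.iterate_succ_apply]

lemma pvRotB_rotate (e : Int) (cs : List Char) (he : 0 ≤ e) (he8 : e ≤ (cs.length : Int)) :
    pvRotB e cs = cs.rotate e.toNat := by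
  unfold pvRotB
  rw [PySem.List.slice_from cs he, PySem.List.slice_to cs he,
    List.rotate_eq_drop_append_take (by omega)]

lemma len8_cases (cs : List Char) (h : cs.length = 8) :
    ∃ a b c d e f g h', cs = [a,b,c,d,e,f,g,h'] := by
  rcases cs with _|⟨a,_|⟨b,_|⟨c,_|⟨d,_|⟨e,_|⟨f,_|⟨g,_|⟨h',rest⟩⟩⟩⟩⟩⟩⟩⟩ <;> simp_all

lemma stepR_one (ds : List Char) (h8 : ds.length = 8) :
    ((some (ds.map pvToS)).bind fun t =>
        (PySem.List.pop? t).map fun r => PySem.List.insert r.2 0 r.1)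
      = some ((ds.rotate 7).map pvToS) := by
  obtain ⟨a,b,c,d,e,f,g,h',rfl⟩ := len8_cases ds h8
  rw [List.rotate_eq_drop_append_take (by simp)]
  simp [PySem.List.pop?, PySem.List.pyIdx?, PySem.List.insert_zero]

lemma stepL_one (ds : List Char) (h8 : ds.length = 8) :
    ((some (ds.map pvToS)).bind fun t =>
        (PySem.List.pop? t 0).map fun r => r.2 ++ [r.1])
      = some ((ds.rotate 1).map pvToS) := by
  obtain ⟨a,b,c,d,e,f,g,h',rfl⟩ := len8_cases ds h8
  rw [List.rotate_eq_drop_append_take (by simp)]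
  simp [PySem.List.pop?, PySem.List.pyIdx?]

lemma iterR (m : Nat) (cs : List Char) (h8 : cs.length = 8) :
    (fun acc => acc.bind fun t =>
        (PySem.List.pop? t).map fun r => PySem.List.insert r.2 0 r.1)^[m]
      (some (cs.map pvToS)) = some ((cs.rotate (7 * m)).map pvToS) := by
  induction m with
  | zero => simp
  | succ k ih =>
    rw [Function.iterate_succ_apply', ih]
    have h8' : (cs.rotate (7 * k)).length = 8 := by simp [h8]
    have := stepR_one (cs.rotate (7 * k)) h8'
    rw [this, List.rotate_rotate]
    have h77 : 7 * k + 7 = 7 * (k + 1) := by ring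
    rw [h77]

lemma iterL (m : Nat) (cs : List Char) (h8 : cs.length = 8) :
    (fun acc => acc.bind fun t =>
        (PySem.List.pop? t 0).map fun r => r.2 ++ [r.1])^[m]
      (some (cs.map pvToS)) = some ((cs.rotate m).map pvToS) := by
  induction m with
  | zero => simp
  | succ k ih =>
    rw [Function.iterate_succ_apply', ih]
    have h8' : (cs.rotate k).length = 8 := by simp [h8]
    have := stepL_one (cs.rotate k) h8'
    rw [this, List.rotate_rotate]

lemma rotRcore_eq (n : Int) (hn : 0 ≤ n) (cs : List Char) (h8 : cs.length = 8) :
    pyRotRightCore n (cs.map pvToS) = some ((cs.rotate ((-n) % 8).toNat).map pvToS) := by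
  unfold pyRotRightCore
  have hlen : ((cs.map pvToS).length : Int) = 8 := by simp [h8]
  rw [hlen]
  simp only [PySem.Int.mod?, if_neg (by norm_num : (8:Int) ≠ 0), Option.bind_some, fmod8]
  by_cases h0 : n % 8 = 0
  · rw [if_pos h0]
    have : (-n) % 8 = 0 := by omega
    rw [this]
    simp
  · rw [if_neg h0]
    have hfold := foldl_const (PySem.List.pyRange 0 n 1)
      (fun acc => acc.bind fun t =>
        (PySem.List.pop? t).map fun r => PySem.List.insert r.2 0 r.1)
      (some (cs.map pvToS))
    rw [hfold, PySem.List.length_pyRange_one, iterR _ cs h8]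
    have e1 : cs.rotate (7 * (n - 0).toNat) = cs.rotate ((7 * (n - 0).toNat) % 8) := by
      rw [← h8, List.rotate_mod]
    have e2 : cs.rotate ((-n) % 8).toNat = cs.rotate (((-n) % 8).toNat % 8) := by
      rw [← h8, List.rotate_mod]
    have em : (7 * (n - 0).toNat) % 8 = ((-n) % 8).toNat % 8 := by omega
    rw [e1, e2, em]

lemma rotLcore_eq (n : Int) (hn : 0 ≤ n) (cs : List Char) (h8 : cs.length = 8) :
    pyRotLeftCore n (cs.map pvToS) = some ((cs.rotate (n % 8).toNat).map pvToS) := by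
  unfold pyRotLeftCore
  have hlen : ((cs.map pvToS).length : Int) = 8 := by simp [h8]
  rw [hlen]
  simp only [PySem.Int.mod?, if_neg (by norm_num : (8:Int) ≠ 0), Option.bind_some, fmod8]
  by_cases h0 : n % 8 = 0
  · rw [if_pos h0, h0]
    simp
  · rw [if_neg h0]
    have hfold := foldl_const (PySem.List.pyRange 0 n 1)
      (fun acc => acc.bind fun t =>
        (PySem.List.pop? t 0).map fun r => r.2 ++ [r.1])
      (some (cs.map pvToS))
    rw [hfold, PySem.List.length_pyRange_one, iterL _ cs h8]
    have e1 : cs.rotate (n - 0).toNat = cs.rotate ((n - 0).toNat % 8) := by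
      rw [← h8, List.rotate_mod]
    have e2 : cs.rotate (n % 8).toNat = cs.rotate ((n % 8).toNat % 8) := by
      rw [← h8, List.rotate_mod]
    have em : ((n - 0).toNat) % 8 = (n % 8).toNat % 8 := by omega
    rw [e1, e2, em]

lemma letter_char (x : String) (hx : pvIsLetter x = true) : ∃ c, x = pvToS c ∧ c ∈ pvBase := by
  simp [pvIsLetter] at hx
  rcases hx with rfl|rfl|rfl|rfl|rfl|rfl|rfl|rfl
  · exact ⟨'a', rfl, by decide⟩
  · exact ⟨'b', rfl, by decide⟩
  · exact ⟨'c', rfl, by decide⟩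
  · exact ⟨'d', rfl, by decide⟩
  · exact ⟨'e', rfl, by decide⟩
  · exact ⟨'f', rfl, by decide⟩
  · exact ⟨'g', rfl, by decide⟩
  · exact ⟨'h', rfl, by decide⟩

lemma indexA (cs : List Char) (hnd : cs.Nodup) (c : Char) (hc : c ∈ cs) :
    ∃ k, ∃ _ : k < cs.length, PySem.List.index? (cs.map pvToS) (pvToS c) = some k ∧ cs[k] = c := by
  rw [index?_map_inj pvToS (fun _ _ => pvToS_inj) cs c]
  have hsome : (PySem.List.index? cs c).isSome := (PySem.List.index?_isSome_iff cs c).mpr hc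
  obtain ⟨k, hk⟩ := Option.isSome_iff_exists.mp hsome
  obtain ⟨hklt, hval, _⟩ := PySem.List.getElem_of_index?_eq_some hk
  exact ⟨k, hklt, hk, hval⟩

lemma find_singleton (cs : List Char) (hnd : cs.Nodup) (c : Char) {k : Nat}
    (hk : k < cs.length) (hck : cs[k] = c) :
    PySem.Chars.find cs [c] = (k : Int) := by
  have hinf : [c] <:+: cs := by
    obtain ⟨s, t, rfl⟩ := List.append_of_mem (hck ▸ List.getElem_mem hk)
    exact ⟨s, t, by simp⟩
  have hpos : 0 ≤ PySem.Chars.find cs [c] := (PySem.Chars.find_nonneg_iff cs [c]).mpr hinf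
  obtain ⟨hpre, _⟩ := PySem.Chars.find_spec hpos
  set m := (PySem.Chars.find cs [c]).toNat with hm
  have hmlt : m < cs.length := by
    by_contra hge
    rw [List.drop_eq_nil_of_le (by omega)] at hpre
    simpa using hpre.length_le
  have hcm : cs[m] = c := by
    obtain ⟨ts, hts⟩ := hpre
    rw [List.drop_eq_getElem_cons hmlt] at hts
    have : c = cs[m] := by injection hts
    exact this.symm
  have : m = k := by
    rw [← hnd.getElem_inj_iff (hi := hmlt) (hj := hk), hcm, hck]
  omega

lemma insert_eq_clamp {α : Type} (xs : List α) (i : Int) (v : α) :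
    PySem.List.insert xs i v =
      xs.take (PySem.List.clampIdx xs.length i) ++ v :: xs.drop (PySem.List.clampIdx xs.length i) := by
  have hk : ∀ n : Nat, ((PySem.List.sliceIndices n (some i) none 1).1).toNat = PySem.List.clampIdx n i := by
    intro n
    simp only [PySem.List.sliceIndices, PySem.List.clampIdx]
    norm_num
    split_ifs <;> omega
  simp only [PySem.List.insert, hk]

lemma slice_to_clamp {α : Type} (xs : List α) (i : Int) :
    PySem.List.slice xs none (some i) = xs.take (PySem.List.clampIdx xs.length i) := by
  simp [PySem.List.slice]

lemma join_toS (cs : List Char) : PySem.Str.join "" (cs.map pvToS) = String.ofList cs := by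
  simp only [PySem.Str.join]
  congr 1
  have h1 : (cs.map pvToS).map String.toList = cs.map (fun c => [c]) := by
    simp [toList_pvToS, Function.comp]
  show PySem.Chars.join "".toList ((cs.map pvToS).map String.toList) = cs
  rw [h1]
  exact PySem.Chars.join_nil_singletons cs

-- ---- more helpers ----

lemma pyIdx8 (i : Int) (h1 : -8 ≤ i) (h2 : i ≤ 7) :
    ∃ k : Nat, k < 8 ∧ PySem.List.pyIdx? 8 i = some k ∧ (k : Int) = i % 8 := by
  unfold PySem.List.pyIdx?
  split_ifs with ha hb hc
  · exact ⟨i.toNat, by omega, rfl, by omega⟩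
  · exfalso; omega
  · exact ⟨8 - (-i).toNat, by omega, rfl, by omega⟩
  · exfalso; omega

lemma eraseIdx_map {α β : Type} (f : α → β) (l : List α) (k : Nat) :
    (l.map f).eraseIdx k = (l.eraseIdx k).map f := by
  simp [List.eraseIdx_eq_take_drop_succ, List.map_take, List.map_drop]

lemma slice_map {α β : Type} (f : α → β) (l : List α) (a b : Option Int) :
    PySem.List.slice (l.map f) a b = (PySem.List.slice l a b).map f := by
  cases a <;> cases b <;>
    simp [PySem.List.slice, List.length_map, List.map_take, List.map_drop]

lemma perm_insert_clamp (r : List Char) (v : Char) (n : Nat) :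
    (r.take n ++ v :: r.drop n).Perm (v :: r) := by
  have := List.perm_middle (a := v) (l₁ := r.take n) (l₂ := r.drop n)
  simpa [List.take_append_drop] using this

lemma perm_cons_eraseIdx (cs : List Char) (k : Nat) (hk : k < cs.length) :
    (cs[k] :: cs.eraseIdx k).Perm cs := by
  conv_rhs => rw [← List.take_append_drop k cs, List.drop_eq_getElem_cons hk]
  rw [List.eraseIdx_eq_take_drop_succ]
  exact (List.perm_middle (a := cs[k]) (l₁ := cs.take k) (l₂ := cs.drop (k+1))).symm

lemma perm_reverse_mid (cs : List Char) (ni m : Nat) :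
    (cs.take ni ++ ((cs.drop ni).take m).reverse ++ cs.drop (ni + m)).Perm cs := by
  conv_rhs => rw [← List.take_append_drop ni cs]
  rw [List.append_assoc]
  apply List.Perm.append_left
  have hdd : (cs.drop ni).drop m = cs.drop (ni + m) := by
    rw [List.drop_drop]
  rw [← hdd]
  have hperm : List.Perm (((cs.drop ni).take m).reverse ++ (cs.drop ni).drop m)
      ((cs.drop ni).take m ++ (cs.drop ni).drop m) :=
    List.Perm.append_right _ (List.reverse_perm _)
  rw [List.take_append_drop] at hperm
  exact hperm

-- ---- per-branch lemmas ----

lemma branch_swap_pos (t : List String) (cs : List Char) (h8 : cs.length = 8)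
    (hnd : cs.Nodup) (hp : cs.Perm pvBase) (a b : String) (i j : Int)
    (ht0 : t[0]? = some "swap") (ht1 : t[1]? = some "position")
    (ht2 : t[2]? = some a) (ht5 : t[5]? = some b)
    (hia : PySem.Int.ofStr? a = some i) (hjb : PySem.Int.ofStr? b = some j)
    (hi1 : -8 ≤ i) (hi2 : i ≤ 7) (hj1 : -8 ≤ j) (hj2 : j ≤ 7) :
    ∃ cs1, pvStepB t cs = some cs1 ∧ cs1.Perm pvBase
      ∧ pvStepA t (cs.map pvToS) = some (cs1.map pvToS) := by
  obtain ⟨k1, hk1, hpi1, hkv1⟩ := pyIdx8 i hi1 hi2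
  obtain ⟨k2, hk2, hpi2, hkv2⟩ := pyIdx8 j hj1 hj2
  have hk1' : k1 < cs.length := by omega
  have hk2' : k2 < cs.length := by omega
  have hgi : PySem.List.pyGet? cs i = some cs[k1] := by
    simp [PySem.List.pyGet?, h8, hpi1, List.getElem?_eq_getElem hk1']
  have hgj : PySem.List.pyGet? cs j = some cs[k2] := by
    simp [PySem.List.pyGet?, h8, hpi2, List.getElem?_eq_getElem hk2']
  refine ⟨pvSwapB cs[k1] cs[k2] cs, ?_,
    (pvSwapB_perm hnd (List.getElem_mem hk1') (List.getElem_mem hk2')).trans hp, ?_⟩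
  · simp [pvStepB, pyGet?_zero, pyGet?_one, pyGet?_two, pyGet?_five, ht0, ht1, ht2, ht5,
      hia, hjb, hgi, hgj]
  · simp only [pvStepA, pySwapPosition, pvSet?, pyGet?_zero, pyGet?_one, pyGet?_two,
      pyGet?_five, ht0, ht1, ht2, ht5, hia, hjb, Option.bind_some, pyGet?_map, hgi, hgj,
      Option.map_some, List.length_map, List.length_set, h8, hpi1, hpi2, if_pos rfl]
    rw [← List.map_set, ← List.map_set, swap_sets cs hnd hk1' hk2']
    simp

lemma branch_swap_letter (t : List String) (cs : List Char) (h8 : cs.length = 8)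
    (hnd : cs.Nodup) (hp : cs.Perm pvBase) (c1 c2 : Char)
    (ht0 : t[0]? = some "swap") (ht1 : t[1]? = some "letter")
    (ht2 : t[2]? = some (pvToS c1)) (ht5 : t[5]? = some (pvToS c2))
    (hc1 : c1 ∈ cs) (hc2 : c2 ∈ cs) :
    ∃ cs1, pvStepB t cs = some cs1 ∧ cs1.Perm pvBase
      ∧ pvStepA t (cs.map pvToS) = some (cs1.map pvToS) := by
  obtain ⟨i1, hi1, hidx1, hv1⟩ := indexA cs hnd c1 hc1
  obtain ⟨j2, hj2, hidx2, hv2⟩ := indexA cs hnd c2 hc2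
  refine ⟨pvSwapB c1 c2 cs, ?_, (pvSwapB_perm hnd hc1 hc2).trans hp, ?_⟩
  · rw [← translate_pair c1 c2 cs]
    simp [pvStepB, pyGet?_zero, pyGet?_one, pyGet?_two, pyGet?_five, ht0, ht1, ht2, ht5]
  · simp only [pvStepA, pySwapLetter, pyGet?_zero, pyGet?_one, pyGet?_two, pyGet?_five,
      ht0, ht1, ht2, ht5, Option.bind_some, hidx1, hidx2, if_pos rfl]
    simp only [if_neg (by decide : ¬ ("letter" : String) = "position"), if_pos rfl,
      Option.bind_some]
    rw [← hv1, ← hv2, ← List.map_set, ← List.map_set, swap_sets cs hnd hj2 hi1,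
      pvSwapB_comm, hv1, hv2]
    simp

lemma branch_rot_left (t : List String) (cs : List Char) (h8 : cs.length = 8)
    (hp : cs.Perm pvBase) (x : String) (n : Int)
    (ht0 : t[0]? = some "rotate") (ht1 : t[1]? = some "left") (ht2 : t[2]? = some x)
    (hxn : PySem.Int.ofStr? x = some n) (hn : 0 ≤ n) :
    ∃ cs1, pvStepB t cs = some cs1 ∧ cs1.Perm pvBase
      ∧ pvStepA t (cs.map pvToS) = some (cs1.map pvToS) := by
  have hmod : 0 ≤ Int.fmod n 8 ∧ Int.fmod n 8 ≤ (cs.length : Int) := by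
    rw [fmod8]; constructor <;> omega
  have hrot : pvRotB (Int.fmod n 8) cs = cs.rotate (n % 8).toNat := by
    rw [pvRotB_rotate _ _ hmod.1 hmod.2, fmod8]
  refine ⟨pvRotB (Int.fmod n 8) cs, ?_, ?_, ?_⟩
  · simp [pvStepB, pyGet?_zero, pyGet?_one, pyGet?_two, ht0, ht1, ht2, hxn,
      PySem.Int.mod?, h8]
  · rw [hrot]; exact (List.rotate_perm cs _).trans hp
  · simp only [pvStepA, pyRotateLeft, pyGet?_zero, pyGet?_one, pyGet?_two, ht0, ht1, ht2,
      hxn, Option.bind_some, if_pos rfl,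
      if_neg (by decide : ¬ ("rotate" : String) = "swap")]
    rw [rotLcore_eq n hn cs h8, hrot]
    simp

lemma branch_rot_right (t : List String) (cs : List Char) (h8 : cs.length = 8)
    (hp : cs.Perm pvBase) (x : String) (n : Int)
    (ht0 : t[0]? = some "rotate") (ht1 : t[1]? = some "right") (ht2 : t[2]? = some x)
    (hxn : PySem.Int.ofStr? x = some n) (hn : 0 ≤ n) :
    ∃ cs1, pvStepB t cs = some cs1 ∧ cs1.Perm pvBase
      ∧ pvStepA t (cs.map pvToS) = some (cs1.map pvToS) := by
  have hmod : 0 ≤ Int.fmod (-n) 8 ∧ Int.fmod (-n) 8 ≤ (cs.length : Int) := by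
    rw [fmod8]; constructor <;> omega
  have hrot : pvRotB (Int.fmod (-n) 8) cs = cs.rotate ((-n) % 8).toNat := by
    rw [pvRotB_rotate _ _ hmod.1 hmod.2, fmod8]
  refine ⟨pvRotB (Int.fmod (-n) 8) cs, ?_, ?_, ?_⟩
  · simp [pvStepB, pyGet?_zero, pyGet?_one, pyGet?_two, ht0, ht1, ht2, hxn,
      PySem.Int.mod?, h8]
  · rw [hrot]; exact (List.rotate_perm cs _).trans hp
  · simp only [pvStepA, pyRotateRight, pyGet?_zero, pyGet?_one, pyGet?_two, ht0, ht1, ht2,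
      hxn, Option.bind_some, if_pos rfl,
      if_neg (by decide : ¬ ("rotate" : String) = "swap"),
      if_neg (by decide : ¬ ("right" : String) = "left")]
    rw [rotRcore_eq n hn cs h8, hrot]
    simp

lemma branch_rot_based (t : List String) (cs : List Char) (h8 : cs.length = 8)
    (hnd : cs.Nodup) (hp : cs.Perm pvBase) (c : Char)
    (ht0 : t[0]? = some "rotate") (ht1 : t[1]? = some "based") (ht6 : t[6]? = some (pvToS c))
    (hc : c ∈ cs) :
    ∃ cs1, pvStepB t cs = some cs1 ∧ cs1.Perm pvBase
      ∧ pvStepA t (cs.map pvToS) = some (cs1.map pvToS) := by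
  obtain ⟨k, hk, hidx, hck⟩ := indexA cs hnd c hc
  have hfind : PySem.Chars.find cs [c] = (k : Int) := find_singleton cs hnd c hk hck
  set m : Int := (k : Int) + (if 4 ≤ k then 2 else 1) with hm
  have hmod : 0 ≤ Int.fmod (-m) 8 ∧ Int.fmod (-m) 8 ≤ (cs.length : Int) := by
    rw [fmod8]; constructor <;> omega
  have hrot : pvRotB (Int.fmod (-m) 8) cs = cs.rotate ((-m) % 8).toNat := by
    rw [pvRotB_rotate _ _ hmod.1 hmod.2, fmod8]
  refine ⟨pvRotB (Int.fmod (-m) 8) cs, ?_, ?_, ?_⟩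
  · simp only [pvStepB, pyGet?_zero, pyGet?_one, pyGet?_six, ht0, ht1, ht6,
      Option.bind_some, toList_pvToS, hfind,
      if_neg (by decide : ¬ ("rotate" : String) = "swap"),
      if_neg (by decide : ¬ ("based" : String) = "left"),
      if_neg (by decide : ¬ ("based" : String) = "right"), if_pos rfl]
    rw [if_neg (by omega : ¬ ((k : Nat) : Int) = -1)]
    simp [PySem.Int.mod?, h8, hm]
  · rw [hrot]; exact (List.rotate_perm cs _).trans hp
  · simp only [pvStepA, pyRotatePosition, pyGet?_zero, pyGet?_one, pyGet?_six, ht0, ht1,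
      ht6, Option.bind_some, hidx,
      if_neg (by decide : ¬ ("rotate" : String) = "swap"),
      if_neg (by decide : ¬ ("based" : String) = "left"),
      if_neg (by decide : ¬ ("based" : String) = "right"), if_pos rfl]
    have hrotm : (if ((k : Nat) : Int) ≥ 4 then ((k : Int) + 1) + 1 else ((k : Int) + 1)) = m := by
      by_cases h4 : 4 ≤ k
      · rw [if_pos (by exact_mod_cast h4), hm, if_pos h4]; ring
      · rw [if_neg (by exact_mod_cast h4), hm, if_neg h4]
    rw [hrotm, rotRcore_eq m (by omega) cs h8, hrot]
    simp

lemma branch_reverse (t : List String) (cs : List Char) (h8 : cs.length = 8)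
    (hp : cs.Perm pvBase) (a b : String) (i j : Int)
    (ht0 : t[0]? = some "reverse") (ht2 : t[2]? = some a) (ht4 : t[4]? = some b)
    (hia : PySem.Int.ofStr? a = some i) (hjb : PySem.Int.ofStr? b = some j)
    (hi0 : 0 ≤ i) (hij : i ≤ j) (hj7 : j ≤ 7) :
    ∃ cs1, pvStepB t cs = some cs1 ∧ cs1.Perm pvBase
      ∧ pvStepA t (cs.map pvToS) = some (cs1.map pvToS) := by
  refine ⟨PySem.List.slice cs none (some i) ++ (PySem.List.slice cs (some i) (some (j + 1))).reverse
      ++ PySem.List.slice cs (some (j + 1)) none, ?_, ?_, ?_⟩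
  · simp [pvStepB, pyGet?_zero, pyGet?_two, pyGet?_four, ht0, ht2, ht4, hia, hjb]
  · rw [PySem.List.slice_to cs hi0, PySem.List.slice_toNat cs hi0 (by omega),
      PySem.List.slice_from cs (by omega)]
    have hperm := perm_reverse_mid cs i.toNat ((j + 1).toNat - i.toNat)
    rw [show i.toNat + ((j + 1).toNat - i.toNat) = (j + 1).toNat by omega] at hperm
    exact hperm.trans hp
  · simp only [pvStepA, pyReversePosition, pyGet?_zero, pyGet?_two, pyGet?_four, ht0, ht2,
      ht4, hia, hjb, Option.bind_some,
      if_neg (by decide : ¬ ("reverse" : String) = "swap"),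
      if_neg (by decide : ¬ ("reverse" : String) = "rotate"), if_pos rfl]
    rw [PySem.List.slice_zero_start]
    rw [slice_map, slice_map, slice_map]
    simp [List.map_reverse]

lemma branch_move (t : List String) (cs : List Char) (h8 : cs.length = 8)
    (hp : cs.Perm pvBase) (a b : String) (i0 j : Int)
    (ht0 : t[0]? = some "move") (ht2 : t[2]? = some a) (ht5 : t[5]? = some b)
    (hia : PySem.Int.ofStr? a = some i0) (hjb : PySem.Int.ofStr? b = some j)
    (hi1 : -8 ≤ i0) (hi2 : i0 ≤ 7) :
    ∃ cs1, pvStepB t cs = some cs1 ∧ cs1.Perm pvBase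
      ∧ pvStepA t (cs.map pvToS) = some (cs1.map pvToS) := by
  obtain ⟨k, hk, hpi, hkv⟩ := pyIdx8 i0 hi1 hi2
  have hk' : k < cs.length := by omega
  have hfm : Int.fmod i0 8 = (k : Int) := by rw [fmod8]; omega
  have hge : PySem.List.pyGet? cs (Int.fmod i0 8) = some cs[k] := by
    rw [hfm, pyGet?_nat, List.getElem?_eq_getElem hk']
  have hr0 : PySem.List.slice cs none (some (Int.fmod i0 8))
      ++ PySem.List.slice cs (some (Int.fmod i0 8 + 1)) none = cs.eraseIdx k := by
    rw [hfm, PySem.List.slice_to cs (by omega), PySem.List.slice_from cs (by omega),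
      List.eraseIdx_eq_take_drop_succ,
      show ((k : Nat) : Int).toNat = k by omega,
      show (((k : Nat) : Int) + 1).toNat = k + 1 by omega]
  have h7 : (cs.eraseIdx k).length = 7 := by
    simp [List.length_eraseIdx, hk, h8]
  set nc := PySem.List.clampIdx 7 j with hnc
  refine ⟨(cs.eraseIdx k).take nc ++ cs[k] :: (cs.eraseIdx k).drop nc, ?_, ?_, ?_⟩
  · simp only [pvStepB, pyGet?_zero, pyGet?_two, pyGet?_five, ht0, ht2, ht5, hia, hjb,
      Option.bind_some, PySem.Int.mod?, h8, Nat.cast_ofNat,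
      if_neg (by decide : ¬ ("move" : String) = "swap"),
      if_neg (by decide : ¬ ("move" : String) = "rotate"),
      if_neg (by decide : ¬ ("move" : String) = "reverse"), if_pos rfl]
    rw [if_neg (by norm_num : ¬ ((8:Int)) = 0)]
    simp only [Option.bind_some, hge, Option.map_some, if_true]
    rw [hr0, slice_to_clamp, PySem.List.slice_some_none, h7, hnc]
  · exact ((perm_insert_clamp (cs.eraseIdx k) cs[k] nc).trans
      (perm_cons_eraseIdx cs k hk')).trans hp
  · simp only [pvStepA, pyMovePositions, PySem.List.pop?, pyGet?_zero, pyGet?_two,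
      pyGet?_five, ht0, ht2, ht5, hia, hjb, Option.bind_some, List.length_map, h8, hpi,
      List.getElem?_map, List.getElem?_eq_getElem hk', Option.map_some, Option.bind_some,
      if_neg (by decide : ¬ ("move" : String) = "swap"),
      if_neg (by decide : ¬ ("move" : String) = "rotate"),
      if_neg (by decide : ¬ ("move" : String) = "reverse"), if_pos rfl]
    rw [eraseIdx_map, insert_eq_clamp]
    simp only [List.length_map, h7, ← hnc, List.map_append, List.map_take, List.map_cons,
      List.map_drop]
    simp

-- ---- the per-instruction step equivalence ----

theorem step_main (t : List String) (cs : List Char) (hok : pvOkLine t = true)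
    (hp : cs.Perm pvBase) :
    ∃ cs1, pvStepB t cs = some cs1 ∧ cs1.Perm pvBase
      ∧ pvStepA t (cs.map pvToS) = some (cs1.map pvToS) := by
  have h8 : cs.length = 8 := hp.length_eq.trans (by decide)
  have hnd : cs.Nodup := hp.nodup_iff.mpr (by decide)
  cases ht0 : t[0]? with
  | none => simp [pvOkLine, ht0] at hok
  | some op =>
    simp only [pvOkLine, ht0] at hok
    by_cases hop1 : op = "swap"
    · subst hop1
      rw [if_pos rfl] at hok
      cases ht1 : t[1]? with
      | none => simp [ht1] at hok
      | some w =>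
        simp only [ht1] at hok
        by_cases hw1 : w = "position"
        · subst hw1
          rw [if_pos rfl] at hok
          cases ht2 : t[2]? with
          | none => simp [ht2] at hok
          | some a =>
          cases ht5 : t[5]? with
          | none => simp [ht2, ht5] at hok
          | some b =>
          simp only [ht2, ht5] at hok
          cases hia : PySem.Int.ofStr? a with
          | none => rw [hia] at hok; revert hok; cases PySem.Int.ofStr? b <;> simp
          | some i =>
          cases hjb : PySem.Int.ofStr? b with
          | none => rw [hia, hjb] at hok; simp at hok
          | some j =>
          rw [hia, hjb, decide_eq_true_iff] at hok
          obtain ⟨hi1, hi2, hj1, hj2⟩ := hok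
          exact branch_swap_pos t cs h8 hnd hp a b i j ht0 ht1 ht2 ht5 hia hjb hi1 hi2 hj1 hj2
        · by_cases hw2 : w = "letter"
          · subst hw2
            rw [if_neg hw1, if_pos rfl] at hok
            cases ht2 : t[2]? with
            | none => simp [ht2] at hok
            | some a =>
            cases ht5 : t[5]? with
            | none => simp [ht2, ht5] at hok
            | some b =>
            simp only [ht2, ht5, Bool.and_eq_true] at hok
            obtain ⟨c1, rfl, hc1⟩ := letter_char a hok.1
            obtain ⟨c2, rfl, hc2⟩ := letter_char b hok.2
            exact branch_swap_letter t cs h8 hnd hp c1 c2 ht0 ht1 ht2 ht5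
              (hp.mem_iff.mpr hc1) (hp.mem_iff.mpr hc2)
          · refine ⟨cs, ?_, hp, ?_⟩
            · simp [pvStepB, pyGet?_zero, pyGet?_one, ht0, ht1, hw1, hw2]
            · simp [pvStepA, pyGet?_zero, pyGet?_one, ht0, ht1, hw1, hw2]
    · by_cases hop2 : op = "rotate"
      · subst hop2
        rw [if_neg hop1, if_pos rfl] at hok
        cases ht1 : t[1]? with
        | none => simp [ht1] at hok
        | some w =>
          simp only [ht1] at hok
          by_cases hwl : w = "left"
          · subst hwl
            rw [if_pos (Or.inl rfl)] at hok
            cases ht2 : t[2]? with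
            | none => simp [ht2] at hok
            | some x =>
            simp only [ht2] at hok
            cases hxn : PySem.Int.ofStr? x with
            | none => rw [hxn] at hok; simp at hok
            | some n =>
            rw [hxn, decide_eq_true_iff] at hok
            exact branch_rot_left t cs h8 hp x n ht0 ht1 ht2 hxn hok
          · by_cases hwr : w = "right"
            · subst hwr
              rw [if_pos (Or.inr rfl)] at hok
              cases ht2 : t[2]? with
              | none => simp [ht2] at hok
              | some x =>
              simp only [ht2] at hok
              cases hxn : PySem.Int.ofStr? x with
              | none => rw [hxn] at hok; simp at hok
              | some n =>
              rw [hxn, decide_eq_true_iff] at hok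
              exact branch_rot_right t cs h8 hp x n ht0 ht1 ht2 hxn hok
            · by_cases hwb : w = "based"
              · subst hwb
                rw [if_neg (by simp [hwl, hwr]), if_pos rfl] at hok
                cases ht6 : t[6]? with
                | none => simp [ht6] at hok
                | some x =>
                simp only [ht6] at hok
                obtain ⟨c, rfl, hcb⟩ := letter_char x hok
                exact branch_rot_based t cs h8 hnd hp c ht0 ht1 ht6 (hp.mem_iff.mpr hcb)
              · refine ⟨cs, ?_, hp, ?_⟩
                · simp [pvStepB, pyGet?_zero, pyGet?_one, ht0, ht1, hop1, hwl, hwr, hwb]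
                · simp [pvStepA, pyGet?_zero, pyGet?_one, ht0, ht1, hop1, hwl, hwr, hwb]
      · by_cases hop3 : op = "reverse"
        · subst hop3
          rw [if_neg hop1, if_neg hop2, if_pos rfl] at hok
          cases ht2 : t[2]? with
          | none => simp [ht2] at hok
          | some a =>
          cases ht4 : t[4]? with
          | none => simp [ht2, ht4] at hok
          | some b =>
          simp only [ht2, ht4] at hok
          cases hia : PySem.Int.ofStr? a with
          | none => rw [hia] at hok; revert hok; cases PySem.Int.ofStr? b <;> simp
          | some i =>
          cases hjb : PySem.Int.ofStr? b with
          | none => rw [hia, hjb] at hok; simp at hok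
          | some j =>
          rw [hia, hjb, decide_eq_true_iff] at hok
          obtain ⟨h1, h2, h3⟩ := hok
          exact branch_reverse t cs h8 hp a b i j ht0 ht2 ht4 hia hjb h1 h2 h3
        · by_cases hop4 : op = "move"
          · subst hop4
            rw [if_neg hop1, if_neg hop2, if_neg hop3, if_pos rfl] at hok
            cases ht2 : t[2]? with
            | none => simp [ht2] at hok
            | some a =>
            cases ht5 : t[5]? with
            | none => simp [ht2, ht5] at hok
            | some b =>
            simp only [ht2, ht5] at hok
            cases hia : PySem.Int.ofStr? a with
            | none => rw [hia] at hok; revert hok; cases PySem.Int.ofStr? b <;> simp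
            | some i0 =>
            cases hjb : PySem.Int.ofStr? b with
            | none => rw [hia, hjb] at hok; simp at hok
            | some j =>
            rw [hia, hjb, decide_eq_true_iff] at hok
            obtain ⟨h1, h2⟩ := hok
            exact branch_move t cs h8 hp a b i0 j ht0 ht2 ht5 hia hjb h1 h2
          · refine ⟨cs, ?_, hp, ?_⟩
            · simp [pvStepB, pyGet?_zero, ht0, hop1, hop2, hop3, hop4]
            · simp [pvStepA, pyGet?_zero, ht0, hop1, hop2, hop3, hop4]

-- ---- folding over all instruction lines ----

lemma fold_main (lines : List (List String)) (cs : List Char)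
    (hok : ∀ t ∈ lines, pvOkLine t = true) (hp : cs.Perm pvBase) :
    ∃ cs', lines.foldl (fun acc t => acc.bind (pvStepB t)) (some cs) = some cs'
      ∧ cs'.Perm pvBase
      ∧ lines.foldl (fun acc t => acc.bind (pvStepA t)) (some (cs.map pvToS))
          = some (cs'.map pvToS) := by
  induction lines generalizing cs with
  | nil => exact ⟨cs, rfl, hp, rfl⟩
  | cons t ts ih =>
    obtain ⟨cs1, hb, hp1, heq⟩ := step_main t cs (hok t (by simp)) hp
    obtain ⟨cs', h1, h2, h3⟩ := ih cs1 (fun u hu => hok u (by simp [hu])) hp1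
    refine ⟨cs', ?_, h2, ?_⟩
    · simpa [hb] using h1
    · simpa [heq] using h3
  
-- ===== VERDICT (by name: the statement is the Claim_ definition above) =====
theorem part1_spec : Claim_equal_part1 := by
  unfold Claim_equal_part1
  intro data _ hpre
  unfold Spec_part1
  unfold Pre_part1 at hpre
  have hall : ∀ l ∈ (PySem.Str.split? data "\n").getD [], pvOkLine (PySem.Str.split₀ l) = true := by
    rw [List.all_eq_true] at hpre
    exact fun l hl => hpre l hl
  have hok : ∀ t ∈ ((PySem.Str.split? data "\n").getD []).map PySem.Str.split₀, pvOkLine t = true := by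
    intro t ht
    obtain ⟨l, hl, rfl⟩ := List.mem_map.mp ht
    exact hall l hl
  obtain ⟨cs', h1, _, h3⟩ := fold_main (((PySem.Str.split? data "\n").getD []).map PySem.Str.split₀)
    pvBase (hok) (List.Perm.refl _)
  have h1' : ((PySem.Str.split? data "\n").getD []).foldl
      (fun acc line => acc.bind (pvStepB (PySem.Str.split₀ line))) (some pvBase) = some cs' := by
    rw [List.foldl_map] at h1
    exact h1
  have hinit : (["a","b","c","d","e","f","g","h"] : List String) = pvBase.map pvToS := by decide
  simp only [part1, part1_alt]
  rw [hinit]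
  rw [show ("abcdefgh".toList : List Char) = pvBase from rfl]
  rw [h3, h1']
  exact join_toS cs'
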